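-- pv_equiv track=rewrite | github.com/MiniLangProject/MiniLangCompilerPy | mlc/frontend.py | normalize_code_for_tokenizer
-- ===== SOURCE A (Python) =====
-- def normalize_code_for_tokenizer(code: str) -> str:
--     """Normalize source code for tokenization.
--
--     Currently this only rewrites *binary minus* cases where a digit follows
--     immediately, e.g. ``x-1`` becomes ``x - 1``.
--
--     Constraints:
--         - Never touches string literals.
--         - Never touches ``//`` line comments.
--         - Keeps unary negatives intact: ``-1``, ``2*-3``, ``(-4)``, etc.
--
--     Args:
--         code: Raw MiniLang source.
--
--     Returns:
--         A normalized source string.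
--     """
--
--     out: list[str] = []
--     n = len(code)
--     i = 0
--
--     in_string = False
--     in_line_comment = False
--     escape = False
--
--     def prev_nonspace_char(out_list: list[str]) -> str:
--         j = len(out_list) - 1
--         while j >= 0 and out_list[j].isspace():
--             j -= 1
--         return out_list[j] if j >= 0 else ""
--
--     while i < n:
--         c = code[i]
--
--         # Handle line comments
--         if in_line_comment:
--             out.append(c)
--             if c == "\n":
--                 in_line_comment = False
--             i += 1
--             continue
--
--         # Enter line comment (only when not in string)
--         if not in_string and c == "/" and i + 1 < n and code[i + 1] == "/":
--             out.append(c)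
--             out.append(code[i + 1])
--             i += 2
--             in_line_comment = True
--             continue
--
--         # Handle string literals (double quotes)
--         if in_string:
--             out.append(c)
--             if escape:
--                 escape = False
--             elif c == "\\":
--                 escape = True
--             elif c == '"':
--                 in_string = False
--             i += 1
--             continue
--
--         # Enter string
--         if c == '"':
--             out.append(c)
--             in_string = True
--             i += 1
--             continue
--
--         # Rewrite: "-" followed by digit, where the previous non-space char can end an expr.
--         if c == "-" and i + 1 < n and code[i + 1].isdigit():
--             p = prev_nonspace_char(out)
--             # Expression-ending chars: identifier/number (alnum/_), ')' or ']'
--             if p.isalnum() or p == "_" or p in (")", "]"):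
--                 # Ensure space before '-'
--                 if out and not out[-1].isspace():
--                     out.append(" ")
--                 out.append("-")
--                 # Ensure space after '-'
--                 if i + 1 < n and not code[i + 1].isspace():
--                     out.append(" ")
--                 i += 1
--                 continue
--
--         # Default: copy char
--         out.append(c)
--         i += 1
--
--     return "".join(out)
-- ===== SOURCE B (Python) =====
-- def _code_mask(code: str) -> list:
--     """True at indices processed as plain code (outside string literals and // comments)."""
--     n = len(code)
--     mask = []
--     i = 0
--     while i < n:
--         c = code[i]
--         if c == '"':
--             mask.append(True)  # opening quote is seen in code state
--             i += 1
--             while i < n: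
--                 mask.append(False)
--                 if code[i] == "\\":
--                     if i + 1 < n:
--                         mask.append(False)
--                     i += 2
--                 elif code[i] == '"':
--                     i += 1
--                     break
--                 else:
--                     i += 1
--         elif c == "/" and i + 1 < n and code[i + 1] == "/":
--             mask.append(False)
--             mask.append(False)
--             i += 2
--             while i < n:
--                 mask.append(False)
--                 if code[i] == "\n":
--                     i += 1
--                     break
--                 i += 1
--         else:
--             mask.append(True)
--             i += 1
--     return mask
--
--
-- def normalize_code_for_tokenizer(code: str) -> str:
--     """Two-stage rewrite: classify positions (code vs string/comment), then map each
--     character to its replacement using only the INPUT (previous non-space input char).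
--     Correct because normalization only inserts spaces, so the last non-space character
--     of the output always equals the last non-space character of the consumed input."""
--     n = len(code)
--     mask = _code_mask(code)
--     parts = []
--     last_ns = ""
--     for i, c in enumerate(code):
--         if (mask[i] and c == "-" and i + 1 < n and code[i + 1].isdigit()
--                 and (last_ns.isalnum() or last_ns in ("_", ")", "]"))):
--             parts.append("- " if i == 0 or code[i - 1].isspace() else " - ")
--         else:
--             parts.append(c)
--         if not c.isspace():
--             last_ns = c
--     return "".join(parts)
-- ===== Notes on version B (the rewrite author's own statement) =====
-- stated objective: alternative
-- what changed: Replaced A's single-pass machine that inspects its own output buffer (rescanning trailing spaces of the output to find the previous non-space emitted char) with a two-stage algorithm: first compute a code/string/comment position mask over the input, then map each input character to its replacement using only input-local data (previous input char and a running last non-space input char), exploiting that normalization only inserts spaces so the input prefix determines A's output-based test.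
import Mathlib
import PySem

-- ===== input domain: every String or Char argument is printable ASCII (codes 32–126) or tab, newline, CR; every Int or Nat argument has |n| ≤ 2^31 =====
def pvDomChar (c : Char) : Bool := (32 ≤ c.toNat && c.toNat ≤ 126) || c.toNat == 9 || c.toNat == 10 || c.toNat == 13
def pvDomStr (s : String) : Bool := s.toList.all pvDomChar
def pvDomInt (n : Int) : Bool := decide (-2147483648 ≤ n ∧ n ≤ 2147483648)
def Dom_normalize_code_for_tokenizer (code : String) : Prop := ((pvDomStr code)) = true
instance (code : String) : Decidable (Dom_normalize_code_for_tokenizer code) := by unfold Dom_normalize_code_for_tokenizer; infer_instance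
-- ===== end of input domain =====

-- B replaces A's machine that inspects its own output buffer with a two-stage, input-driven
-- rewrite (code/string/comment position mask, then local replacement from the input prefix).

-- ===== PORT A =====
-- `out` is kept reversed (Python appends at the end; we cons at the front and reverse at the end).
-- prev_nonspace_char: the backward while-loop over `out` skipping isspace chars = dropWhile on the
-- reversed buffer; returns none for Python's "" sentinel.
def pvPrevNonspaceA (rev : List Char) : Option Char :=
  (rev.dropWhile PySem.Chars.isspace).head?

def pvLoopA : List Char → List Char → Bool → Bool → Bool → List Char
  | [], rev, _, _, _ => rev
  | c :: rest, rev, instr, incom, esc =>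
    if incom = true then
      -- comment body: append, leave on newline
      pvLoopA rest (c :: rev) instr (if c = '\n' then false else incom) esc
    else if instr = false ∧ c = '/' ∧ rest.head? = some '/' then
      -- enter line comment: append both slashes, consume two chars
      pvLoopA rest.tail ('/' :: c :: rev) instr true esc
    else if instr = true then
      if esc = true then pvLoopA rest (c :: rev) instr incom false
      else if c = '\\' then pvLoopA rest (c :: rev) instr incom true
      else if c = '"' then pvLoopA rest (c :: rev) false incom esc
      else pvLoopA rest (c :: rev) instr incom esc
    else if c = '"' then
      pvLoopA rest (c :: rev) true incom esc
    else if c = '-' ∧ rest.head?.any PySem.Chars.isdigit = true then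
      let p := pvPrevNonspaceA rev
      if p.any (fun x => PySem.Chars.isalnum x || x = '_' || x = ')' || x = ']') = true then
        -- ensure space before '-'
        let rev1 := if rev.head?.any (fun x => !PySem.Chars.isspace x) = true then ' ' :: rev else rev
        let rev2 := '-' :: rev1
        -- ensure space after '-' (i+1 < n holds in this branch)
        let rev3 := if rest.head?.any (fun x => !PySem.Chars.isspace x) = true then ' ' :: rev2 else rev2
        pvLoopA rest rev3 instr incom esc
      else pvLoopA rest (c :: rev) instr incom esc
    else pvLoopA rest (c :: rev) instr incom esc
  termination_by cs => cs.length
  decreasing_by all_goals (simp [List.length_tail]; try omega)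

def normalize_code_for_tokenizer (code : String) : String :=
  String.ofList (pvLoopA code.toList [] false false false).reverse

-- ===== PORT B =====
-- Source B pass 1, inner string loop: the mask chunk for the literal body, plus the unconsumed rest.
def pvMaskStr : List Char → List Bool × List Char
  | [] => ([], [])
  | c :: rest =>
    if c = '\\' then
      match rest with
      | [] => ([false], [])
      | _ :: rest2 =>
        let p := pvMaskStr rest2
        (false :: false :: p.1, p.2)
    else if c = '"' then ([false], rest)
    else
      let p := pvMaskStr rest
      (false :: p.1, p.2)

-- Source B pass 1, inner comment loop (body up to and including the newline).
def pvMaskCom : List Char → List Bool × List Char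
  | [] => ([], [])
  | c :: rest =>
    if c = '\n' then ([false], rest)
    else
      let p := pvMaskCom rest
      (false :: p.1, p.2)

-- termination bound for pvMask (cited by its decreasing_by)
theorem pvMaskStr_len : ∀ cs : List Char, (pvMaskStr cs).2.length ≤ cs.length := by
  intro cs
  induction cs using pvMaskStr.induct with
  | case1 => simp [pvMaskStr]
  | case2 => simp [pvMaskStr]
  | case3 head rest2 ih =>
    rw [show pvMaskStr ('\\' :: head :: rest2)
          = (false :: false :: (pvMaskStr rest2).1, (pvMaskStr rest2).2) from rfl]
    simp; omega
  | case4 rest2 h =>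
    rw [pvMaskStr.eq_def]; simp
  | case5 head rest2 h1 h2 ih =>
    rw [pvMaskStr.eq_def]; simp [h1, h2]; omega

theorem pvMaskCom_len : ∀ cs : List Char, (pvMaskCom cs).2.length ≤ cs.length := by
  intro cs
  induction cs using pvMaskCom.induct with
  | case1 => simp [pvMaskCom]
  | case2 rest => rw [pvMaskCom.eq_def]; simp
  | case3 c rest h ih => rw [pvMaskCom.eq_def]; simp [h]; omega

-- Source B's _code_mask: True at the indices the normalizer treats as plain code.
def pvMask : List Char → List Bool
  | [] => []
  | c :: rest =>
    if c = '"' then true :: ((pvMaskStr rest).1 ++ pvMask (pvMaskStr rest).2)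
    else if c = '/' ∧ rest.head? = some '/' then
      false :: false :: ((pvMaskCom rest.tail).1 ++ pvMask (pvMaskCom rest.tail).2)
    else true :: pvMask rest
  termination_by cs => cs.length
  decreasing_by
  · have := pvMaskStr_len rest; simp; omega
  · have h1 := pvMaskCom_len rest.tail; have h2 := rest.length_tail; simp; omega
  · simp

-- Source B pass 2: each input char (paired with its mask bit) maps to its replacement, using only
-- the previous input char and the running last non-space input char.
def pvBuildB : List (Char × Bool) → Option Char → Option Char → List Char
  | [], _, _ => []
  | (c, m) :: rest, prev, lns =>
    if m = true ∧ c = '-' ∧ (rest.head?.map Prod.fst).any PySem.Chars.isdigit = true ∧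
        lns.any (fun x => PySem.Chars.isalnum x || x = '_' || x = ')' || x = ']') = true then
      (if prev.all PySem.Chars.isspace = true then ['-', ' '] else [' ', '-', ' ']) ++
        pvBuildB rest (some c) (some c)
    else c :: pvBuildB rest (some c) (if PySem.Chars.isspace c then lns else some c)

def normalize_code_for_tokenizer_alt (code : String) : String :=
  String.ofList (pvBuildB (code.toList.zip (pvMask code.toList)) none none)

-- ===== PRECONDITION & SPEC =====
def Spec_normalize_code_for_tokenizer (code : String) (out : String) : Prop := out = normalize_code_for_tokenizer_alt code
instance (code : String) (out : String) : Decidable (Spec_normalize_code_for_tokenizer code out) := by unfold Spec_normalize_code_for_tokenizer; infer_instance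

-- ===== CLAIM (what is proved, stated in full; the proofs are below) =====
def Claim_equal_normalize_code_for_tokenizer : Prop := ∀ (code : String), Dom_normalize_code_for_tokenizer code → Spec_normalize_code_for_tokenizer code (normalize_code_for_tokenizer code)

-- ===== LEMMAS AND PROOFS =====

-- step equations for the mask helpers
theorem mStr_bs_nil : pvMaskStr ['\\'] = ([false], []) := rfl
theorem mStr_bs (h : Char) (r : List Char) :
    pvMaskStr ('\\' :: h :: r) = (false :: false :: (pvMaskStr r).1, (pvMaskStr r).2) := rfl
theorem mStr_quote (r : List Char) : pvMaskStr ('"' :: r) = ([false], r) := by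
  rw [pvMaskStr.eq_def]; simp
theorem mStr_other (c : Char) (r : List Char) (h1 : ¬c = '\\') (h2 : ¬c = '"') :
    pvMaskStr (c :: r) = (false :: (pvMaskStr r).1, (pvMaskStr r).2) := by
  rw [pvMaskStr.eq_def]; simp [h1, h2]
theorem mCom_nl (r : List Char) : pvMaskCom ('\n' :: r) = ([false], r) := by
  rw [pvMaskCom.eq_def]; simp
theorem mCom_other (c : Char) (r : List Char) (h : ¬c = '\n') :
    pvMaskCom (c :: r) = (false :: (pvMaskCom r).1, (pvMaskCom r).2) := by
  rw [pvMaskCom.eq_def]; simp [h]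
theorem mask_nil : pvMask [] = [] := by rw [pvMask.eq_def]
theorem mask_quote (r : List Char) :
    pvMask ('"' :: r) = true :: ((pvMaskStr r).1 ++ pvMask (pvMaskStr r).2) := by
  rw [pvMask.eq_def]; simp
theorem mask_comment (c : Char) (r : List Char) (h1 : ¬c = '"')
    (h2 : c = '/' ∧ r.head? = some '/') :
    pvMask (c :: r) = false :: false :: ((pvMaskCom r.tail).1 ++ pvMask (pvMaskCom r.tail).2) := by
  rw [pvMask.eq_def]; simp [h1, h2]
theorem mask_other (c : Char) (r : List Char) (h1 : ¬c = '"')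
    (h2 : ¬(c = '/' ∧ r.head? = some '/')) :
    pvMask (c :: r) = true :: pvMask r := by
  rw [pvMask.eq_def]; simp [h1, h2]

-- the mask continuation corresponding to A's state (instr, incom, esc) on the remaining input
def pvMaskFor (instr incom esc : Bool) (cs : List Char) : List Bool :=
  if incom = true then (pvMaskCom cs).1 ++ pvMask (pvMaskCom cs).2
  else if instr = true then
    if esc = true then
      match cs with
      | [] => []
      | _ :: r => false :: ((pvMaskStr r).1 ++ pvMask (pvMaskStr r).2)
    else (pvMaskStr cs).1 ++ pvMask (pvMaskStr cs).2
  else pvMask cs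

-- state-transition equations for pvMaskFor
theorem mF_com_nl (e : Bool) (r : List Char) :
    pvMaskFor false true e ('\n' :: r) = false :: pvMaskFor false false e r := by
  simp [pvMaskFor, mCom_nl]
theorem mF_com_other (e : Bool) (c : Char) (r : List Char) (h : ¬c = '\n') :
    pvMaskFor false true e (c :: r) = false :: pvMaskFor false true e r := by
  simp [pvMaskFor, mCom_other c r h]
theorem mF_str_esc (c : Char) (r : List Char) :
    pvMaskFor true false true (c :: r) = false :: pvMaskFor true false false r := by
  simp [pvMaskFor]
theorem mF_str_bs (r : List Char) :
    pvMaskFor true false false ('\\' :: r) = false :: pvMaskFor true false true r := by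
  cases r with
  | nil => simp [pvMaskFor, mStr_bs_nil, mask_nil]
  | cons h r2 => simp [pvMaskFor, mStr_bs]
theorem mF_str_quote (r : List Char) :
    pvMaskFor true false false ('"' :: r) = false :: pvMaskFor false false false r := by
  simp [pvMaskFor, mStr_quote]
theorem mF_str_other (c : Char) (r : List Char) (h1 : ¬c = '\\') (h2 : ¬c = '"') :
    pvMaskFor true false false (c :: r) = false :: pvMaskFor true false false r := by
  simp [pvMaskFor, mStr_other c r h1 h2]
theorem mF_code (e : Bool) (cs : List Char) : pvMaskFor false false e cs = pvMask cs := by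
  simp [pvMaskFor]
theorem mF_code_quote (e : Bool) (r : List Char) :
    pvMaskFor false false e ('"' :: r) = true :: pvMaskFor true false false r := by
  simp [pvMaskFor, mask_quote]
theorem mF_code_comment (e : Bool) (r : List Char) (h2 : r.head? = some '/') :
    pvMaskFor false false e ('/' :: r) = false :: false :: pvMaskFor false true e r.tail := by
  simp [pvMaskFor, mask_comment '/' r (by decide) ⟨rfl, h2⟩]
theorem mF_code_other (e : Bool) (c : Char) (r : List Char) (h1 : ¬c = '"')
    (h2 : ¬(c = '/' ∧ r.head? = some '/')) :
    pvMaskFor false false e (c :: r) = true :: pvMaskFor false false e r := by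
  simp [pvMaskFor, mask_other c r h1 h2]

-- length facts, so the zip in B never truncates
theorem pvMaskStr_len_eq : ∀ cs : List Char,
    (pvMaskStr cs).1.length + (pvMaskStr cs).2.length = cs.length := by
  intro cs
  induction cs using pvMaskStr.induct with
  | case1 => simp [pvMaskStr]
  | case2 => simp [mStr_bs_nil]
  | case3 head rest2 ih => simp [mStr_bs]; omega
  | case4 rest2 h => simp [mStr_quote]; omega
  | case5 head rest2 h1 h2 ih => simp [mStr_other head rest2 h1 h2]; omega

theorem pvMaskCom_len_eq : ∀ cs : List Char,
    (pvMaskCom cs).1.length + (pvMaskCom cs).2.length = cs.length := by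
  intro cs
  induction cs using pvMaskCom.induct with
  | case1 => simp [pvMaskCom]
  | case2 rest => simp [mCom_nl]; omega
  | case3 c rest h ih => simp [mCom_other c rest h]; omega

theorem pvMask_len : ∀ cs : List Char, (pvMask cs).length = cs.length := by
  intro cs
  induction cs using pvMask.induct with
  | case1 => simp [mask_nil]
  | case2 rest2 ih =>
    have := pvMaskStr_len_eq rest2
    simp [mask_quote, ih]; omega
  | case3 c rest2 h1 h2 ih =>
    have := pvMaskCom_len_eq rest2.tail
    have := rest2.length_tail
    obtain ⟨hc, hh⟩ := h2
    subst hc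
    rcases rest2 with _ | ⟨r0, rt⟩
    · simp at hh
    · simp at hh
      subst hh
      simp [mask_comment '/' ('/' :: rt) (by decide) ⟨rfl, rfl⟩, ih] at *
      omega
  | case4 c rest2 h1 h2 ih => simp [mask_other c rest2 h1 h2, ih]

theorem pvMaskFor_len (instr incom esc : Bool) (cs : List Char) :
    (pvMaskFor instr incom esc cs).length = cs.length := by
  unfold pvMaskFor
  split_ifs
  · have := pvMaskCom_len_eq cs; have := pvMask_len (pvMaskCom cs).2; simp_all
  · cases cs with
    | nil => simp
    | cons c r =>
      have := pvMaskStr_len_eq r; have := pvMask_len (pvMaskStr r).2; simp_all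
  · have := pvMaskStr_len_eq cs; have := pvMask_len (pvMaskStr cs).2; simp_all
  · exact pvMask_len cs

theorem zip_head_fst (l : List Char) (m : List Bool) (h : m.length = l.length) :
    ((l.zip m).head?.map Prod.fst) = l.head? := by
  cases l <;> cases m <;> simp_all

theorem isdigit_not_isspace (c : Char) (h : PySem.Chars.isdigit c = true) :
    PySem.Chars.isspace c = false := by
  simp [PySem.Chars.isdigit] at h
  obtain ⟨h1, h2⟩ := h
  rw [Char.le_def, UInt32.le_iff_toNat_le] at h1 h2
  have e1 : ('0' : Char).val.toNat = 48 := by decide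
  have e2 : ('9' : Char).val.toNat = 57 := by decide
  have e3 : c.toNat = c.val.toNat := rfl
  simp [PySem.Chars.isspace]
  omega

theorem opt_all_any (o : Option Char) :
    (o.all PySem.Chars.isspace) = !(o.any (fun x => !PySem.Chars.isspace x)) := by
  cases o <;> simp

theorem lns_step (c : Char) (rev : List Char) (lns : Option Char)
    (h : lns = (rev.dropWhile PySem.Chars.isspace).head?) :
    (if PySem.Chars.isspace c then lns else some c)
      = ((c :: rev).dropWhile PySem.Chars.isspace).head? := by
  by_cases hc : PySem.Chars.isspace c = true <;> simp [List.dropWhile_cons, hc, h]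

theorem pv_main : ∀ (n : Nat) (cs : List Char), cs.length ≤ n →
    ∀ (rev : List Char) (instr incom esc : Bool) (prev lns : Option Char),
    (incom = true → instr = false) → (esc = true → instr = true) →
    lns = (rev.dropWhile PySem.Chars.isspace).head? →
    (prev.any (fun x => !PySem.Chars.isspace x) = rev.head?.any (fun x => !PySem.Chars.isspace x)
      ∨ cs.head?.any PySem.Chars.isdigit = true) →
    (pvLoopA cs rev instr incom esc).reverse
      = rev.reverse ++ pvBuildB (cs.zip (pvMaskFor instr incom esc cs)) prev lns := by
  intro n
  induction n with
  | zero =>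
    intro cs hlen rev instr incom esc prev lns _ _ _ _
    have hcs : cs = [] := List.length_eq_zero_iff.mp (Nat.le_zero.mp hlen)
    subst hcs
    simp [pvLoopA, pvBuildB]
  | succ n ih =>
    intro cs hlen rev instr incom esc prev lns hic hes hlns hprev
    cases cs with
    | nil => simp [pvLoopA, pvBuildB]
    | cons c rest =>
      have hr : rest.length ≤ n := by simp at hlen; omega
      cases incom with
      | true =>
        have hi : instr = false := hic rfl
        subst hi
        have he : esc = false := by
          cases esc with
          | false => rfl
          | true => exact absurd (hes rfl) (by simp)
        subst he
        by_cases hc : c = '\n'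
        · subst hc
          have IH := ih rest hr ('\n' :: rev) false false false (some '\n') lns (by simp)
            (by simp)
            (by simp [List.dropWhile_cons, (by decide : PySem.Chars.isspace '\n' = true), hlns])
            (Or.inl (by simp))
          simpa [pvLoopA, pvBuildB, mF_com_nl, List.zip_cons_cons,
            (by decide : PySem.Chars.isspace '\n' = true)] using IH
        · have IH := ih rest hr (c :: rev) false true false (some c)
            (if PySem.Chars.isspace c then lns else some c) (by simp) (by simp)
            (lns_step c rev lns hlns) (Or.inl (by simp))
          simpa [pvLoopA, pvBuildB, mF_com_other false c rest hc, List.zip_cons_cons, hc] using IH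
      | false =>
        cases instr with
        | true =>
          cases esc with
          | true =>
            have IH := ih rest hr (c :: rev) true false false (some c)
              (if PySem.Chars.isspace c then lns else some c) (by simp) (by simp)
              (lns_step c rev lns hlns) (Or.inl (by simp))
            simpa [pvLoopA, pvBuildB, mF_str_esc, List.zip_cons_cons] using IH
          | false =>
            by_cases hb : c = '\\'
            · subst hb
              have IH := ih rest hr ('\\' :: rev) true false true (some '\\')
                (if PySem.Chars.isspace '\\' then lns else some '\\') (by simp) (by simp)
                (lns_step '\\' rev lns hlns) (Or.inl (by simp))
              simpa [pvLoopA, pvBuildB, mF_str_bs, List.zip_cons_cons,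
                (by decide : PySem.Chars.isspace '\\' = false)] using IH
            · by_cases hq : c = '"'
              · subst hq
                have IH := ih rest hr ('"' :: rev) false false false (some '"')
                  (if PySem.Chars.isspace '"' then lns else some '"') (by simp) (by simp)
                  (lns_step '"' rev lns hlns) (Or.inl (by simp))
                simpa [pvLoopA, pvBuildB, mF_str_quote, List.zip_cons_cons,
                  (by decide : PySem.Chars.isspace '"' = false)] using IH
              · have IH := ih rest hr (c :: rev) true false false (some c)
                  (if PySem.Chars.isspace c then lns else some c) (by simp) (by simp)
                  (lns_step c rev lns hlns) (Or.inl (by simp))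
                simpa [pvLoopA, pvBuildB, mF_str_other c rest hb hq, List.zip_cons_cons,
                  hb, hq] using IH
        | false =>
          have he : esc = false := by
            cases esc with
            | false => rfl
            | true => exact absurd (hes rfl) (by simp)
          subst he
          by_cases hcom : c = '/' ∧ rest.head? = some '/'
          · obtain ⟨hc, hh⟩ := hcom
            subst hc
            rcases rest with _ | ⟨r0, rt⟩
            · simp at hh
            · simp at hh
              subst hh
              have hrt : rt.length ≤ n := by simp at hlen; omega
              have IH := ih rt hrt ('/' :: '/' :: rev) false true false (some '/') (some '/')
                (by simp) (by simp)
                (by simp [List.dropWhile_cons, (by decide : PySem.Chars.isspace '/' = false)])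
                (Or.inl (by simp))
              simpa [pvLoopA, pvBuildB, mF_code_comment false ('/' :: rt) rfl,
                List.zip_cons_cons,
                (by decide : PySem.Chars.isspace '/' = false)] using IH
          · by_cases hq : c = '"'
            · subst hq
              have IH := ih rest hr ('"' :: rev) true false false (some '"')
                (if PySem.Chars.isspace '"' then lns else some '"') (by simp) (by simp)
                (lns_step '"' rev lns hlns) (Or.inl (by simp))
              simpa [pvLoopA, pvBuildB, mF_code_quote, List.zip_cons_cons, hcom,
                (by decide : PySem.Chars.isspace '"' = false)] using IH
            · have hmask := mF_code_other false c rest hq hcom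
              have hzhead := zip_head_fst rest (pvMaskFor false false false rest)
                (pvMaskFor_len false false false rest)
              by_cases hcd : c = '-' ∧ rest.head?.any PySem.Chars.isdigit = true
              · obtain ⟨hc1, hc2⟩ := hcd
                subst hc1
                have hpe : prev.any (fun x => !PySem.Chars.isspace x)
                    = rev.head?.any (fun x => !PySem.Chars.isspace x) := by
                  rcases hprev with h | h
                  · exact h
                  · exact absurd h (by simp [(by decide : PySem.Chars.isdigit '-' = false)])
                rcases rest with _ | ⟨d, rt⟩
                · simp at hc2
                · simp at hc2
                  have hdsp : PySem.Chars.isspace d = false := isdigit_not_isspace d hc2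
                  have hrt : rt.length ≤ n := by simp at hlen; omega
                  by_cases hp : lns.any
                      (fun x => PySem.Chars.isalnum x || x = '_' || x = ')' || x = ']') = true
                  · -- rewrite branch
                    have hpA : (pvPrevNonspaceA rev).any
                        (fun x => PySem.Chars.isalnum x || x = '_' || x = ')' || x = ']') = true := by
                      rw [pvPrevNonspaceA, ← hlns]; exact hp
                    by_cases hb : rev.head?.any (fun x => !PySem.Chars.isspace x) = true
                    · have hall : prev.all PySem.Chars.isspace = false := by
                        rw [opt_all_any, hpe, hb]; rfl
                      have IH := ih (d :: rt) hr (' ' :: '-' :: ' ' :: rev) false false false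
                        (some '-') (some '-') (by simp) (by simp)
                        (by simp [List.dropWhile_cons,
                          (by decide : PySem.Chars.isspace ' ' = true),
                          (by decide : PySem.Chars.isspace '-' = false)])
                        (Or.inr (by simp [hc2]))
                      simpa [pvLoopA, pvBuildB, hmask, hzhead, List.zip_cons_cons, hcom, hq,
                        hpA, hp, hc2, hb, hall, hdsp,
                        (by decide : PySem.Chars.isspace ' ' = true),
                        (by decide : PySem.Chars.isspace '-' = false)] using IH
                    · have hall : prev.all PySem.Chars.isspace = true := by
                        rw [opt_all_any, hpe]
                        simp at hb
                        simp [hb]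
                      have IH := ih (d :: rt) hr (' ' :: '-' :: rev) false false false
                        (some '-') (some '-') (by simp) (by simp)
                        (by simp [List.dropWhile_cons,
                          (by decide : PySem.Chars.isspace ' ' = true),
                          (by decide : PySem.Chars.isspace '-' = false)])
                        (Or.inr (by simp [hc2]))
                      simpa [pvLoopA, pvBuildB, hmask, hzhead, List.zip_cons_cons, hcom, hq,
                        hpA, hp, hc2, hb, hall, hdsp,
                        (by decide : PySem.Chars.isspace ' ' = true),
                        (by decide : PySem.Chars.isspace '-' = false)] using IH
                  · -- p-condition fails: both copy the '-'
                    have hpA : ¬ (pvPrevNonspaceA rev).any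
                        (fun x => PySem.Chars.isalnum x || x = '_' || x = ')' || x = ']') = true := by
                      rw [pvPrevNonspaceA, ← hlns]; exact hp
                    have IH := ih (d :: rt) hr ('-' :: rev) false false false (some '-')
                      (if PySem.Chars.isspace '-' then lns else some '-') (by simp) (by simp)
                      (lns_step '-' rev lns hlns) (Or.inl (by simp))
                    simpa [pvLoopA, pvBuildB, hmask, hzhead, List.zip_cons_cons, hcom, hq,
                      hpA, hp, hc2,
                      (by decide : PySem.Chars.isspace '-' = false)] using IH
              · -- plain copy
                have hcond : ¬(c = '-' ∧ rest.head?.any PySem.Chars.isdigit = true ∧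
                    lns.any (fun x => PySem.Chars.isalnum x || x = '_' || x = ')' || x = ']')
                      = true) := fun h => hcd ⟨h.1, h.2.1⟩
                have IH := ih rest hr (c :: rev) false false false (some c)
                  (if PySem.Chars.isspace c then lns else some c) (by simp) (by simp)
                  (lns_step c rev lns hlns) (Or.inl (by simp))
                simpa [pvLoopA, pvBuildB, hmask, hzhead, List.zip_cons_cons, hcom, hq,
                  hcd, hcond] using IH

theorem normalize_code_for_tokenizer_spec : Claim_equal_normalize_code_for_tokenizer := by
  intro code _
  unfold Spec_normalize_code_for_tokenizer normalize_code_for_tokenizer normalize_code_for_tokenizer_alt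
  have h := pv_main code.toList.length code.toList le_rfl [] false false false none none
    (by simp) (by simp) (by simp) (by simp)
  rw [mF_code] at h
  simp only [List.reverse_nil, List.nil_append] at h
  rw [h]
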